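-- pv_equiv track=rewrite | github.com/dholth/advent-of-code | 2025/01/01.py | part_b_simple
-- ===== SOURCE A (Python) =====
-- def part_b_simple(rotations):
--     place = 50
--     zeroes = 0
--     for amt in rotations:
--         place += amt
--         zeroes += abs(place // 100)
--         place %= 100
--     return zeroes
-- ===== SOURCE B (Python) =====
-- def part_b_simple(rotations):
--     # staged passes: materialize the raw prefix sums, map each to its hundred-band,
--     # then sum absolute adjacent band changes
--     sums = [50]
--     total = 50
--     for amt in rotations:
--         total += amt
--         sums.append(total)
--     bands = [s // 100 for s in sums]
--     return sum(abs(b - a) for a, b in zip(bands, bands[1:]))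
-- ===== Notes on version B (the rewrite author's own statement) =====
-- stated objective: alternative
-- what changed: B materializes the whole list of raw prefix sums, maps it to a list of floor-div-100 bands, and sums absolute adjacent band differences over a zip of that list with its tail, replacing A's single pass that counts while re-reducing the position mod 100 in loop-carried state.
import Mathlib
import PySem

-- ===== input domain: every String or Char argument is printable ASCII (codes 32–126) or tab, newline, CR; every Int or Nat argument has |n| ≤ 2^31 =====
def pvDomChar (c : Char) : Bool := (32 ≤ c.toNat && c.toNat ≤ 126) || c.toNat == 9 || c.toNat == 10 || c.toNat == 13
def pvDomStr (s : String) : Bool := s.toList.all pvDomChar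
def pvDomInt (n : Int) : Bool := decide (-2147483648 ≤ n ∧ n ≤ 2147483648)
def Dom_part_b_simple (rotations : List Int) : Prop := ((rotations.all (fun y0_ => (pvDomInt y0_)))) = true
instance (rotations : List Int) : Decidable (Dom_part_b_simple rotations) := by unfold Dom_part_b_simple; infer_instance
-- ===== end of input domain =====

-- B builds the list of raw prefix sums, maps it to floor-div-100 bands, and sums absolute
-- adjacent band differences in staged passes instead of A's mod-reducing counting loop
-- (alternative decomposition, same cost).

-- ===== PORT A =====
def part_b_simple (rotations : List Int) : Int :=
  (rotations.foldl (fun (st : Int × Int) amt =>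
      let place := st.1 + amt
      let zeroes := st.2 + |PySem.Int.floordiv place 100|
      (PySem.Int.mod place 100, zeroes)) (50, 0)).2

-- ===== PORT B =====
def part_b_simple_alt (rotations : List Int) : Int :=
  let sums := (rotations.foldl (fun (st : List Int × Int) amt =>
      let total := st.2 + amt
      (st.1 ++ [total], total)) ([50], 50)).1
  let bands := sums.map (fun s => PySem.Int.floordiv s 100)
  ((bands.zip (bands.drop 1)).map (fun p => |p.2 - p.1|)).foldl (· + ·) 0

-- ===== PRECONDITION & SPEC =====
def Spec_part_b_simple (rotations : List Int) (out : Int) : Prop := out = part_b_simple_alt rotations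
instance (rotations : List Int) (out : Int) : Decidable (Spec_part_b_simple rotations out) := by unfold Spec_part_b_simple; infer_instance

-- ===== CLAIM (what is proved, stated in full; the proofs are below) =====
def Claim_equal_part_b_simple : Prop := ∀ (rotations : List Int), Dom_part_b_simple rotations → Spec_part_b_simple rotations (part_b_simple rotations)

-- ===== LEMMAS AND PROOFS =====

theorem pv_floordiv_shift (a k : Int) :
    PySem.Int.floordiv (a - 100 * k) 100 = PySem.Int.floordiv a 100 - k := by
  rw [PySem.Int.floordiv_eq_ediv_of_pos (by norm_num),
      PySem.Int.floordiv_eq_ediv_of_pos (by norm_num)]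
  omega

theorem pv_mod_eq (a : Int) :
    PySem.Int.mod a 100 = a - 100 * PySem.Int.floordiv a 100 := by
  rw [PySem.Int.mod_eq_emod_of_pos (by norm_num),
      PySem.Int.floordiv_eq_ediv_of_pos (by norm_num)]
  omega

-- B's prefix-sum loop produces the scanl of addition
theorem pv_sums_eq (l : List Int) (acc : List Int) (c : Int) :
    (l.foldl (fun (st : List Int × Int) amt =>
        let total := st.2 + amt
        (st.1 ++ [total], total)) (acc, c)).1
      = acc ++ (List.scanl (· + ·) c l).tail := by
  induction l generalizing acc c with
  | nil => simp
  | cons a t ih =>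
    simp only [List.foldl_cons, List.scanl_cons]
    rw [ih]
    cases t <;> simp [List.scanl]

-- fold of absolute adjacent differences, stepping off a two-element prefix
theorem pv_pairfold_cons (x y : Int) (rest : List Int) (z : Int) :
    (((x :: y :: rest).zip ((x :: y :: rest).drop 1)).map (fun p => |p.2 - p.1|)).foldl (· + ·) z
    = (((y :: rest).zip ((y :: rest).drop 1)).map (fun p => |p.2 - p.1|)).foldl (· + ·) (z + |y - x|) := by
  simp

-- main loop correspondence: A's mod-reduced loop equals the band-difference fold over the scanl
theorem pv_main (l : List Int) (c z : Int) :
    (l.foldl (fun (st : Int × Int) amt =>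
        let place := st.1 + amt
        let zeroes := st.2 + |PySem.Int.floordiv place 100|
        (PySem.Int.mod place 100, zeroes)) (PySem.Int.mod c 100, z)).2
    = (((List.scanl (· + ·) c l).map (fun s => PySem.Int.floordiv s 100)).zip
        (((List.scanl (· + ·) c l).map (fun s => PySem.Int.floordiv s 100)).drop 1)
        |>.map (fun p => |p.2 - p.1|)).foldl (· + ·) z := by
  induction l generalizing c z with
  | nil => simp [List.scanl]
  | cons a t ih =>
    simp only [List.foldl_cons, List.scanl_cons]
    have h1 : PySem.Int.mod c 100 + a = (c + a) - 100 * PySem.Int.floordiv c 100 := by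
      rw [pv_mod_eq]; ring
    have h2 : PySem.Int.floordiv (PySem.Int.mod c 100 + a) 100
        = PySem.Int.floordiv (c + a) 100 - PySem.Int.floordiv c 100 := by
      rw [h1, pv_floordiv_shift]
    have h3 : PySem.Int.mod (PySem.Int.mod c 100 + a) 100 = PySem.Int.mod (c + a) 100 := by
      rw [h1, pv_mod_eq, pv_mod_eq, pv_floordiv_shift]; ring
    simp only [h2, h3]
    rw [ih (c + a) (z + |PySem.Int.floordiv (c + a) 100 - PySem.Int.floordiv c 100|)]
    cases t with
    | nil => simp [List.scanl]
    | cons b t' =>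
      simp only [List.scanl_cons, List.map_cons]
      rw [pv_pairfold_cons]

-- ===== VERDICT (by name: the statement is the Claim_ definition above) =====
theorem part_b_simple_spec : Claim_equal_part_b_simple := by
  intro rotations _
  unfold Spec_part_b_simple part_b_simple part_b_simple_alt
  rw [pv_sums_eq]
  have h := pv_main rotations 50 0
  rw [show PySem.Int.mod 50 100 = (50 : Int) from by decide] at h
  rw [h]
  have hsc : [(50 : Int)] ++ (List.scanl (· + ·) 50 rotations).tail
      = List.scanl (· + ·) 50 rotations := by
    cases rotations <;> simp [List.scanl]
  simp only [hsc]
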